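-- pv_equiv track=rewrite | github.com/duclvq/seal | extract_app/app.py | _encode_audio_key
-- ===== SOURCE A (Python) =====
-- def _encode_audio_key(text: str) -> list:
--     txt2 = (text + "\x00\x00")[:2]
--     bits = []
--     for ch in txt2:
--         b = ord(ch) & 0xFF
--         for i in range(7, -1, -1):
--             bits.append((b >> i) & 1)
--     return bits
-- ===== SOURCE B (Python) =====
-- def _encode_audio_key(text: str) -> list:
--     txt2 = (text + "\x00\x00")[:2]
--     # pack the two bytes into one 16-bit integer by positional arithmetic
--     val = (ord(txt2[0]) % 256) * 256 + ord(txt2[1]) % 256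
--     # extract its 16 binary digits LSB-first with divmod, then reverse
--     bits = []
--     for _ in range(16):
--         val, r = divmod(val, 2)
--         bits.append(r)
--     bits.reverse()
--     return bits
-- ===== Notes on version B (the rewrite author's own statement) =====
-- stated objective: alternative
-- what changed: B uses no bitwise operators and no per-character loop: it packs the two padded bytes into one 16-bit integer by positional arithmetic (mod/multiply/add), extracts its binary digits LSB-first by repeated divmod, and reverses the list, building the output back-to-front instead of A's MSB-first shift-and-mask per character.
import Mathlib
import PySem

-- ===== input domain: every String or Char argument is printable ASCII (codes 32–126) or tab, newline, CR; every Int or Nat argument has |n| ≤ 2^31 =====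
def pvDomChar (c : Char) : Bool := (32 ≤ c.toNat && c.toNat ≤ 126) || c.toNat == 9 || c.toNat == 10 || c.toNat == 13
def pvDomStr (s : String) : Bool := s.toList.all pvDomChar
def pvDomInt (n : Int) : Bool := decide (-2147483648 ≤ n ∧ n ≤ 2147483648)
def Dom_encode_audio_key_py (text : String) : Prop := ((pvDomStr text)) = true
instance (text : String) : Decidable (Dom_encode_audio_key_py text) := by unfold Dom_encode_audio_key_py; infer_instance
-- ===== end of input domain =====

-- B replaces A's per-character MSB-first shift-and-mask loops by packing both padded bytes
-- into one 16-bit integer (pure arithmetic, no bitwise ops) and extracting its binary digits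
-- LSB-first by repeated divmod, reversing at the end (objective: alternative).


-- ===== PORT A =====
def encode_audio_key_py (text : String) : List Int :=
  -- txt2 = (text + "\x00\x00")[:2]
  let txt2 : List Char := PySem.List.slice (text.toList ++ [Char.ofNat 0, Char.ofNat 0]) none (some 2)
  -- for ch in txt2: b = ord(ch) & 0xFF; for i in range(7, -1, -1): bits.append((b >> i) & 1)
  txt2.foldl (fun bits ch =>
    (PySem.List.pyRange 7 (-1) (-1)).foldl (fun bits i =>
      bits ++ [PySem.Int.band ((PySem.Int.band (ch.toNat : Int) 255) >>> i.toNat) 1]) bits) []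

-- ===== PORT B =====
def encode_audio_key_py_alt (text : String) : List Int :=
  -- txt2 = (text + "\x00\x00")[:2]
  let txt2 : List Char := PySem.List.slice (text.toList ++ [Char.ofNat 0, Char.ofNat 0]) none (some 2)
  -- txt2 always has exactly 2 characters, so txt2[0] / txt2[1] never raise; the match is
  -- a totality guard only (the `_` branch is unreachable)
  match txt2 with
  | c0 :: c1 :: _ =>
    -- val = (ord(txt2[0]) % 256) * 256 + ord(txt2[1]) % 256
    let val : Int := (PySem.Int.mod (c0.toNat : Int) 256) * 256 + PySem.Int.mod (c1.toNat : Int) 256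
    -- for _ in range(16): val, r = divmod(val, 2); bits.append(r)
    let st := (PySem.List.pyRange 0 16 1).foldl
      (fun (s : Int × List Int) _ =>
        (PySem.Int.floordiv s.1 2, s.2 ++ [PySem.Int.mod s.1 2])) (val, [])
    -- bits.reverse()
    st.2.reverse
  | _ => []

-- ===== PRECONDITION & SPEC =====
def Spec_encode_audio_key_py (text : String) (out : List Int) : Prop := out = encode_audio_key_py_alt text
instance (text : String) (out : List Int) : Decidable (Spec_encode_audio_key_py text out) := by unfold Spec_encode_audio_key_py; infer_instance

-- ===== CLAIM (what is proved, stated in full; the proofs are below) =====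
def Claim_equal_encode_audio_key_py : Prop := ∀ (text : String), Dom_encode_audio_key_py text → Spec_encode_audio_key_py text (encode_audio_key_py text)

-- ===== LEMMAS AND PROOFS =====

-- both ports, applied to the two characters of txt2, agree
lemma pv_main (c0 c1 : Char) :
    ([c0, c1] : List Char).foldl (fun bits ch =>
      (PySem.List.pyRange 7 (-1) (-1)).foldl (fun bits i =>
        bits ++ [PySem.Int.band ((PySem.Int.band (ch.toNat : Int) 255) >>> i.toNat) 1]) bits) []
    = ((PySem.List.pyRange 0 16 1).foldl
        (fun (s : Int × List Int) _ =>
          (PySem.Int.floordiv s.1 2, s.2 ++ [PySem.Int.mod s.1 2]))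
        ((PySem.Int.mod (c0.toNat : Int) 256) * 256 + PySem.Int.mod (c1.toNat : Int) 256, [])).2.reverse := by
  have h7 : PySem.List.pyRange 7 (-1) (-1)
      = [((7:Nat):Int), ((6:Nat):Int), ((5:Nat):Int), ((4:Nat):Int),
         ((3:Nat):Int), ((2:Nat):Int), ((1:Nat):Int), ((0:Nat):Int)] := by decide
  have h16 : PySem.List.pyRange 0 16 1
      = [0,1,2,3,4,5,6,7,8,9,10,11,12,13,14,15] := by decide
  have hband : ∀ n : Nat, PySem.Int.band (n:Int) 255 = ((n % 256 : Nat) : Int) := fun n => by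
    rw [show ((255:Int)) = ((255:Nat):Int) from rfl, PySem.Int.band_natCast]
    norm_num [Nat.and_two_pow_sub_one_eq_mod n 8]
  have hmod : ∀ n : Nat, PySem.Int.mod (n:Int) 256 = ((n % 256 : Nat) : Int) := fun n => by
    exact_mod_cast PySem.Int.mod_natCast n 256
  have hA : ∀ m k : Nat, PySem.Int.band ((m:Int) >>> ((((k:Nat):Int).toNat : Nat) : Int)) 1
      = (((m >>> k) &&& 1 : Nat) : Int) := fun m k => by
    rw [show (((k:Nat):Int).toNat) = k from Int.toNat_natCast k, Int.shiftRight_natCast]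
    exact_mod_cast PySem.Int.band_natCast (m >>> k) 1
  have hval : ∀ a b : Nat, ((a:Int) * 256 + (b:Int)) = ((a*256+b : Nat):Int) := fun a b => by
    push_cast; ring
  have hfd : ∀ v : Nat, PySem.Int.floordiv (v:Int) 2 = ((v/2 : Nat) : Int) := fun v => by
    exact_mod_cast PySem.Int.floordiv_natCast v 2
  have hmd : ∀ v : Nat, PySem.Int.mod (v:Int) 2 = ((v%2 : Nat) : Int) := fun v => by
    exact_mod_cast PySem.Int.mod_natCast v 2
  rw [h7, h16]
  simp only [List.foldl, hband, hmod, hA, hval, hfd, hmd,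
    List.nil_append, List.cons_append,
    List.reverse_cons, List.reverse_nil]
  have hm0 : c0.toNat % 256 < 256 := Nat.mod_lt _ (by norm_num)
  have hm1 : c1.toNat % 256 < 256 := Nat.mod_lt _ (by norm_num)
  generalize c0.toNat % 256 = m0 at *
  generalize c1.toNat % 256 = m1 at *
  simp only [List.cons.injEq, Nat.cast_inj, and_true]
  and_intros <;>
    · simp only [Nat.shiftRight_eq_div_pow, Nat.and_one_is_mod]
      norm_num
      omega

-- ===== VERDICT (by name: the statement is the Claim_ definition above) =====
theorem encode_audio_key_py_spec : Claim_equal_encode_audio_key_py := by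
  intro text _
  unfold Spec_encode_audio_key_py encode_audio_key_py encode_audio_key_py_alt
  rw [show ((2:Int)) = ((2:Nat):Int) by norm_num, PySem.List.slice_to_natCast]
  rcases text.toList with _ | ⟨a, _ | ⟨b, t⟩⟩ <;>
    simp only [List.cons_append, List.nil_append, List.take_succ_cons, List.take_zero] <;>
    exact pv_main _ _
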